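-- pv_equiv track=rewrite | github.com/roschwarz/readiator-1 | seq_handling.py | is_it_DNA
-- ===== SOURCE A (Python) =====
-- import string
--
-- def is_it_DNA(seq):
--
--     nucleotides = ['A', 'C', 'G', 'T', 'N', 'a', 'c', 'g', 't', 'n']
--
--     anti_nucleotides = list(string.ascii_uppercase)
--
--     for an in list(string.ascii_lowercase):
--        anti_nucleotides.append(an)
--     for n in nucleotides:
--        anti_nucleotides.remove(n)
--
--     res = any(ele in seq for ele in anti_nucleotides)
--     if res:
--         return False
--     else:
--         return True
-- ===== SOURCE B (Python) =====
-- import string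
--
-- _ANTI = set(string.ascii_letters) - set('ACGTNacgtn')
--
-- def is_it_DNA(seq):
--     for c in seq:
--         if c in _ANTI:
--             return False
--     return True
-- ===== Notes on version B (the rewrite author's own statement) =====
-- stated objective: simpler
-- what changed: A scans the sequence once per each of the 42 non-nucleotide letters after building that letter list with 52 list operations; B precomputes the anti-letter set once and makes a single early-exit pass over the sequence.
import Mathlib
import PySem

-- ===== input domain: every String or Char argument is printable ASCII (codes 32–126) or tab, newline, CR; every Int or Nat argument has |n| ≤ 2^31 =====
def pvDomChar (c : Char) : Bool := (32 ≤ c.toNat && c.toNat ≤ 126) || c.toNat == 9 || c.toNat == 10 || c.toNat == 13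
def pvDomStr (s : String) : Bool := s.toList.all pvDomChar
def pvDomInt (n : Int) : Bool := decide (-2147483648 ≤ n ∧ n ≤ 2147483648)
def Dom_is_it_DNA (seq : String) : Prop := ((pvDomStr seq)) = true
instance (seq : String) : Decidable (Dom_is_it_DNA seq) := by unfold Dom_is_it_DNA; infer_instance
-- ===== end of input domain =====

-- B replaces A's 52 list operations plus a membership scan of seq per anti-letter by one
-- precomputed anti-letter set and a single early-exit pass over seq (objective: simpler).

-- ===== PORT A =====
def pvNucleotides : List Char := ['A', 'C', 'G', 'T', 'N', 'a', 'c', 'g', 't', 'n']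

def pvAsciiUpper : List Char := "ABCDEFGHIJKLMNOPQRSTUVWXYZ".toList
def pvAsciiLower : List Char := "abcdefghijklmnopqrstuvwxyz".toList

-- anti_nucleotides: uppercase, then the lowercase letters appended, then each nucleotide
-- removed (list.remove; every nucleotide is present, so remove? never returns none and
-- getD is never taken — exact).
def pvAntiA : List Char :=
  pvNucleotides.foldl (fun acc n => (PySem.List.remove? acc n).getD acc)
    (pvAsciiUpper ++ pvAsciiLower)

-- `ele in seq` with ele a 1-character string is substring containment, which for a single
-- character equals character membership — exact on 1-char needles.
def is_it_DNA (seq : String) : Bool :=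
  let res := pvAntiA.any (fun ele => seq.toList.contains ele)
  if res then false else true

-- ===== PORT B =====
-- anti = set(string.ascii_letters) - set('ACGTNacgtn'); ascii_letters = lowercase ++ uppercase.
def pvAntiB : PySem.Set Char :=
  PySem.Set.diff (PySem.Set.ofList ("abcdefghijklmnopqrstuvwxyz".toList ++ "ABCDEFGHIJKLMNOPQRSTUVWXYZ".toList))
    (PySem.Set.ofList "ACGTNacgtn".toList)

def pvBLoop : List Char → Bool
  | [] => true
  | c :: rest => if PySem.Set.contains pvAntiB c then false else pvBLoop rest

def is_it_DNA_alt (seq : String) : Bool := pvBLoop seq.toList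

-- ===== PRECONDITION & SPEC =====
def Spec_is_it_DNA (seq : String) (out : Bool) : Prop := out = is_it_DNA_alt seq
instance (seq : String) (out : Bool) : Decidable (Spec_is_it_DNA seq out) := by unfold Spec_is_it_DNA; infer_instance

-- ===== CLAIM (what is proved, stated in full; the proofs are below) =====
def Claim_equal_is_it_DNA : Prop := ∀ (seq : String), Dom_is_it_DNA seq → Spec_is_it_DNA seq (is_it_DNA seq)

-- ===== LEMMAS AND PROOFS =====

-- Both anti-letter collections have the same members.
-- same members, different order (A lists uppercase first, B's set lowercase first)
set_option maxRecDepth 8000 in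
theorem pvAnti_perm : pvAntiA.Perm pvAntiB := by decide

-- B's early-exit loop computes "no character of the list is an anti-letter".
theorem pvBLoop_eq (l : List Char) : pvBLoop l = !(l.any (fun c => PySem.Set.contains pvAntiB c)) := by
  induction l with
  | nil => rfl
  | cons c rest ih =>
    simp only [pvBLoop, List.any_cons, Bool.not_or]
    by_cases h : PySem.Set.contains pvAntiB c = true <;> simp [h, ih]

-- swap the scan: some anti-letter occurs in seq ↔ some character of seq is an anti-letter.
theorem pvSwap (l m : List Char) : l.any (fun a => m.contains a) = m.any (fun c => l.contains c) := by
  rw [Bool.eq_iff_iff]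
  simp only [List.any_eq_true, List.contains_iff_mem]
  exact ⟨fun ⟨a, ha, hm⟩ => ⟨a, hm, ha⟩, fun ⟨a, ha, hm⟩ => ⟨a, hm, ha⟩⟩

-- ===== VERDICT (by name: the statement is the Claim_ definition above) =====
theorem is_it_DNA_spec : Claim_equal_is_it_DNA := by
  intro seq _
  unfold Spec_is_it_DNA is_it_DNA is_it_DNA_alt
  rw [pvBLoop_eq, pvSwap]
  have hmem : ∀ c, (pvAntiA.contains c) = PySem.Set.contains pvAntiB c := by
    intro c
    simp [PySem.Set.contains_eq_listContains, List.contains_iff_mem, pvAnti_perm.mem_iff]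
  simp only [hmem]
  cases hc : seq.toList.any (fun c => PySem.Set.contains pvAntiB c) <;>
    simp [hc]
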